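-- pv_equiv track=rewrite | github.com/eXtern-OS/eXternOS-Base | squashfs-root/usr/lib/python3/dist-packages/debian/deb822.py | _skip_useless_lines
-- ===== SOURCE A (Python) =====
-- def _skip_useless_lines(sequence):
--     """Yields only lines that do not begin with '#'.
--
--     Also skips any blank lines at the beginning of the input.
--     """
--     at_beginning = True
--     for line in sequence:
--         # The bytes/str polymorphism required here to support Python 3
--         # is unpleasant, but fortunately limited.  We need this because
--         # at this point we might have been given either bytes or
--         # Unicode, and we haven't yet got to the point where we can try
--         # to decode a whole paragraph and detect its encoding.
--         if isinstance(line, bytes):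
--             if line.startswith(b'#'):
--                 continue
--         else:
--             if line.startswith('#'):
--                 continue
--         if at_beginning:
--             if isinstance(line, bytes):
--                 if not line.rstrip(b'\r\n'):
--                     continue
--             else:
--                 if not line.rstrip('\r\n'):
--                     continue
--             at_beginning = False
--         yield line
-- ===== SOURCE B (Python) =====
-- def _is_comment(line):
--     if isinstance(line, bytes):
--         return line.startswith(b'#')
--     return line.startswith('#')
--
--
-- def _is_blank(line):
--     if isinstance(line, bytes):
--         return not line.rstrip(b'\r\n')
--     return not line.rstrip('\r\n')
--
--
-- def _skip_useless_lines(sequence):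
--     """Yields only lines that do not begin with '#'.
--
--     Also skips any blank lines at the beginning of the input.
--     """
--     it = iter(sequence)
--     # Phase one: skip comments and leading blanks, yield the first real line.
--     for line in it:
--         if _is_comment(line) or _is_blank(line):
--             continue
--         yield line
--         break
--     # Phase two: from here on only comments are dropped.
--     for line in it:
--         if _is_comment(line):
--             continue
--         yield line
-- ===== Notes on version B (the rewrite author's own statement) =====
-- stated objective: alternative
-- what changed: Replaces the single flag-driven loop with two explicit phases over one shared iterator: the first loop skips comments and leading blanks and stops after yielding the first real line, the second loop only drops comments, so no at_beginning flag is carried.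
import Mathlib
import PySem

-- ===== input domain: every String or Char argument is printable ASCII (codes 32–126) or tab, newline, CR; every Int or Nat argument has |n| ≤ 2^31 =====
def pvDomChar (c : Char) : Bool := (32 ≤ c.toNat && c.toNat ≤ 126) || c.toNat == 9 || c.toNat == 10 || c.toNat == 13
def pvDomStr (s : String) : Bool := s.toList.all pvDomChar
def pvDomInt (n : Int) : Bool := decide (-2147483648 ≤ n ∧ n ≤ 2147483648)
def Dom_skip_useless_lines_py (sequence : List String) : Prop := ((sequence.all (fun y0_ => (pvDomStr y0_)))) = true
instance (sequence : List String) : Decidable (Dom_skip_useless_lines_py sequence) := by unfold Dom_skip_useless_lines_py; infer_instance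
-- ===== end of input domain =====

-- B replaces A's single flag-driven loop with two explicit phases over the same list
-- (skip comments and leading blanks until the first real line, then only drop comments);
-- objective: alternative decomposition, same cost.


-- Hand port of `line.rstrip('\r\n')` (PySem has no chars-argument rstrip): drop trailing
-- '\r'/'\n' characters; exact on all strings. Both Pythons use this rstrip.
def pyRstripCRLF (s : String) : List Char :=
  (s.toList.reverse.dropWhile (fun c => c == '\r' || c == '\n')).reverse

-- ===== PORT A =====
-- A's single loop carrying the at_beginning flag. The inputs are Lean Strings, so only
-- the str branch of the bytes/str dispatch is reachable and is what is ported.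
def skipUselessLoopA : List String → Bool → List String
  | [], _ => []
  | line :: rest, atBeginning =>
    if PySem.Str.startswith line "#" then
      skipUselessLoopA rest atBeginning
    else if atBeginning then
      if (pyRstripCRLF line).isEmpty then
        skipUselessLoopA rest atBeginning
      else
        line :: skipUselessLoopA rest false
    else
      line :: skipUselessLoopA rest false

def skip_useless_lines_py (sequence : List String) : List String :=
  skipUselessLoopA sequence true

-- ===== PORT B =====
def isCommentB (line : String) : Bool := PySem.Str.startswith line "#"

def isBlankB (line : String) : Bool := (pyRstripCRLF line).isEmpty

-- Phase two: only comments are dropped.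
def skipPhaseTwo : List String → List String
  | [] => []
  | line :: rest =>
    if isCommentB line then skipPhaseTwo rest else line :: skipPhaseTwo rest

-- Phase one: skip comments and leading blanks; the first real line is yielded and the
-- remaining items go to phase two.
def skipPhaseOne : List String → List String
  | [] => []
  | line :: rest =>
    if isCommentB line || isBlankB line then skipPhaseOne rest
    else line :: skipPhaseTwo rest

def skip_useless_lines_py_alt (sequence : List String) : List String :=
  skipPhaseOne sequence

-- ===== PRECONDITION & SPEC =====
def Spec_skip_useless_lines_py (sequence : List String) (out : List String) : Prop := out = skip_useless_lines_py_alt sequence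
instance (sequence : List String) (out : List String) : Decidable (Spec_skip_useless_lines_py sequence out) := by unfold Spec_skip_useless_lines_py; infer_instance

-- ===== CLAIM (what is proved, stated in full; the proofs are below) =====
def Claim_equal_skip_useless_lines_py : Prop := ∀ (sequence : List String), Dom_skip_useless_lines_py sequence → Spec_skip_useless_lines_py sequence (skip_useless_lines_py sequence)

-- ===== LEMMAS AND PROOFS =====
theorem loopA_false_eq_phaseTwo (l : List String) :
    skipUselessLoopA l false = skipPhaseTwo l := by
  induction l with
  | nil => rfl
  | cons line rest ih =>
    simp only [skipUselessLoopA, skipPhaseTwo, isCommentB]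
    split_ifs <;> simp_all

theorem loopA_true_eq_phaseOne (l : List String) :
    skipUselessLoopA l true = skipPhaseOne l := by
  induction l with
  | nil => rfl
  | cons line rest ih =>
    simp only [skipUselessLoopA, skipPhaseOne, isCommentB, isBlankB]
    by_cases hc : PySem.Chars.startswith line.toList ['#'] = true <;>
      by_cases hb : pyRstripCRLF line = [] <;>
        simp_all [loopA_false_eq_phaseTwo]

-- ===== VERDICT (by name: the statement is the Claim_ definition above) =====
theorem skip_useless_lines_py_spec : Claim_equal_skip_useless_lines_py := by
  intro sequence _
  show skip_useless_lines_py sequence = skip_useless_lines_py_alt sequence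
  exact loopA_true_eq_phaseOne sequence
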